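-- pv_equiv track=rewrite | github.com/mlefebvre1/projecteuler-python | project_euler/problems/problem90.py | squares_validation
-- ===== SOURCE A (Python) =====
-- def two_dices_pairs(dice1, dice2):
--     for f1 in dice1:
--         for f2 in dice2:
--             yield "".join(f1 + f2)
--     for f2 in dice1:
--         for f1 in dice2:
--             yield "".join(f1 + f2)
--
-- def squares_validation(dice1, dice2):
--     squares = {
--         "presence": [0, 0, 0, 0, 0, 0, 0, 0, 0],
--         "val": [
--             ["01"],
--             ["04"],
--             ["09", "06"],
--             ["16", "19"],
--             ["25"],
--             ["36", "39"],
--             ["49", "46"],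
--             ["64", "94"],
--             ["81"],
--         ],
--     }
--     pairs = list(two_dices_pairs(dice1, dice2))
--     for i, square in enumerate(squares["val"]):
--         for pos in square:
--             if pos in pairs:
--                 squares["presence"][i] = 1
--     for presence in squares["presence"]:
--         if presence == 0:
--             return False
--     else:
--         return True
-- ===== SOURCE B (Python) =====
-- _SQUARES = ("01", "04", "06", "16", "25", "36", "46", "64", "81")
-- _NORM = str.maketrans("9", "6")
--
-- def _key(face):
--     return "".join(face).translate(_NORM)
--
-- def squares_validation(dice1, dice2):
--     keys1 = {_key(f) for f in dice1}
--     keys2 = {_key(f) for f in dice2}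
--     def covered(sq):
--         return any((sq[:i] in keys1 and sq[i:] in keys2)
--                    or (sq[:i] in keys2 and sq[i:] in keys1)
--                    for i in range(len(sq) + 1))
--     return all(covered(sq) for sq in _SQUARES)
-- ===== Notes on version B (the rewrite author's own statement) =====
-- stated objective: faster
-- what changed: A materializes all 2*n1*n2 concatenated face pairs and scans that list for each of 14 tabulated square encodings; B never enumerates pairs: it builds one set of 9-to-6-normalized face keys per die and decides each of the nine normalized squares by checking its len+1 prefix/suffix splits against the two key sets.
import Mathlib
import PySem

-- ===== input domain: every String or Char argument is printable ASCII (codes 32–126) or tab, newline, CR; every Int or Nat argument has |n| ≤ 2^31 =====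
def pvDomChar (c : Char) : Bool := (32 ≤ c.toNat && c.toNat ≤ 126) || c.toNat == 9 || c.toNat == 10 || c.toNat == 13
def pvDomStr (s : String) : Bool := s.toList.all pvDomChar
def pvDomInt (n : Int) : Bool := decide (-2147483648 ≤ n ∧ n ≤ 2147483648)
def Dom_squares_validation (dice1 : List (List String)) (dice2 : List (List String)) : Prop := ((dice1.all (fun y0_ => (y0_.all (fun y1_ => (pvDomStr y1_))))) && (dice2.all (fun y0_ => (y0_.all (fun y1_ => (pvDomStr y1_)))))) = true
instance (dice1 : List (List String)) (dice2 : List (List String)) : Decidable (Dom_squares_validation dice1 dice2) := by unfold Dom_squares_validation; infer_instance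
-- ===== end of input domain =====

-- B drops A's pair enumeration entirely: it builds one set of 9→6-normalized face keys per die
-- and decides each of the nine normalized squares by checking its prefix/suffix splits against
-- the two key sets (objective: faster — no cross product of faces is ever built).


-- ===== PORT A =====
def two_dices_pairs (dice1 : List (List String)) (dice2 : List (List String)) : List String :=
  (dice1.flatMap (fun f1 => dice2.map (fun f2 => PySem.Str.join "" (f1 ++ f2))))
    ++ (dice1.flatMap (fun f2 => dice2.map (fun f1 => PySem.Str.join "" (f1 ++ f2))))

-- squares["val"] of A
def pvValsA : List (List String) :=
  [["01"], ["04"], ["09", "06"], ["16", "19"], ["25"], ["36", "39"], ["49", "46"], ["64", "94"], ["81"]]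

def squares_validation (dice1 : List (List String)) (dice2 : List (List String)) : Bool :=
  let presence0 : List Int := [0, 0, 0, 0, 0, 0, 0, 0, 0]
  let pairs := two_dices_pairs dice1 dice2
  let presence := (PySem.List.enumerate pvValsA).foldl
    (fun pres isq => isq.2.foldl
      (fun p pos => if pairs.contains pos then PySem.List.pySetD p isq.1 1 else p) pres)
    presence0
  !(presence.any (fun pr => pr == 0))

-- ===== PORT B =====
-- _key: str.translate with the single-entry table '9'→'6'. PySem has no translate primitive, so it
-- is ported by hand as the character map it performs (exact: each character is looked up in the
-- table, '9' maps to '6', every other character is kept).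
def pvNorm (s : String) : String :=
  String.ofList (s.toList.map (fun c => if c == '9' then '6' else c))

def pvKey (face : List String) : String := pvNorm (PySem.Str.join "" face)

-- the two set comprehensions {_key(f) for f in dice}
def pvKeys (d : List (List String)) : PySem.Set String := PySem.Set.ofList (d.map pvKey)

-- covered(sq): any over range(len(sq)+1) of the two split membership tests
def pvCovered (keys1 keys2 : PySem.Set String) (sq : String) : Bool :=
  (PySem.List.pyRange 0 ((PySem.Str.len sq : Int) + 1) 1).any (fun i =>
    (PySem.Set.contains keys1 (PySem.Str.slice sq none (some i))
        && PySem.Set.contains keys2 (PySem.Str.slice sq (some i) none))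
    || (PySem.Set.contains keys2 (PySem.Str.slice sq none (some i))
        && PySem.Set.contains keys1 (PySem.Str.slice sq (some i) none)))

def squares_validation_alt (dice1 : List (List String)) (dice2 : List (List String)) : Bool :=
  let keys1 := pvKeys dice1
  let keys2 := pvKeys dice2
  (["01", "04", "06", "16", "25", "36", "46", "64", "81"] : List String).all
    (fun sq => pvCovered keys1 keys2 sq)

-- ===== PRECONDITION & SPEC =====
def Spec_squares_validation (dice1 : List (List String)) (dice2 : List (List String)) (out : Bool) : Prop := out = squares_validation_alt dice1 dice2
instance (dice1 : List (List String)) (dice2 : List (List String)) (out : Bool) : Decidable (Spec_squares_validation dice1 dice2 out) := by unfold Spec_squares_validation; infer_instance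

-- ===== CLAIM (what is proved, stated in full; the proofs are below) =====
def Claim_equal_squares_validation : Prop := ∀ (dice1 : List (List String)) (dice2 : List (List String)), Dom_squares_validation dice1 dice2 → Spec_squares_validation dice1 dice2 (squares_validation dice1 dice2)

-- ===== LEMMAS AND PROOFS =====

-- the character-level normalization that pvNorm performs
def pvF (c : Char) : Char := if c == '9' then '6' else c

theorem pvNorm_toList (s : String) : (pvNorm s).toList = s.toList.map pvF := by
  simp only [pvNorm, String.toList_ofList]
  rfl

theorem pvF_eq (a c : Char) (h9 : c ≠ '9') : pvF a = c ↔ (a = c ∨ (c = '6' ∧ a = '9')) := by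
  by_cases h : a = '9'
  · subst h
    rw [show pvF '9' = '6' from rfl]
    constructor
    · intro hc; exact Or.inr ⟨hc.symm, rfl⟩
    · rintro (hc | ⟨h6, -⟩)
      · exact absurd hc.symm h9
      · exact h6.symm
  · rw [show pvF a = a from by simp [pvF, h]]
    constructor
    · intro hc; exact Or.inl hc
    · rintro (hc | ⟨-, h9'⟩)
      · exact hc
      · exact absurd h9' h

theorem mapf_eq (l : List Char) (x y : Char) :
    l.map pvF = [x, y] ↔ ∃ a b, l = [a, b] ∧ pvF a = x ∧ pvF b = y := by
  cases l with
  | nil => simp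
  | cons a tl =>
    cases tl with
    | nil => simp
    | cons b tl2 =>
      cases tl2 with
      | nil => simp [eq_comm]
      | cons c tl3 => simp

theorem shapeA (l : List Char) (x y : Char) (hx6 : x ≠ '6') (hx9 : x ≠ '9') (hy6 : y ≠ '6') (hy9 : y ≠ '9') :
    l.map pvF = [x, y] ↔ l = [x, y] := by
  rw [mapf_eq]
  constructor
  · rintro ⟨a, b, rfl, ha, hb⟩
    rcases (pvF_eq a x hx9).1 ha with rfl | ⟨h, -⟩
    · rcases (pvF_eq b y hy9).1 hb with rfl | ⟨h, -⟩
      · rfl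
      · exact absurd h hy6
    · exact absurd h hx6
  · rintro rfl
    exact ⟨x, y, rfl, by simp [pvF, hx9], by simp [pvF, hy9]⟩

theorem shapeB (l : List Char) (x : Char) (hx6 : x ≠ '6') (hx9 : x ≠ '9') :
    l.map pvF = [x, '6'] ↔ (l = [x, '9'] ∨ l = [x, '6']) := by
  rw [mapf_eq]
  constructor
  · rintro ⟨a, b, rfl, ha, hb⟩
    rcases (pvF_eq a x hx9).1 ha with rfl | ⟨h, -⟩
    · rcases (pvF_eq b '6' (by decide)).1 hb with rfl | ⟨-, rfl⟩
      · exact Or.inr rfl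
      · exact Or.inl rfl
    · exact absurd h hx6
  · rintro (rfl | rfl)
    · exact ⟨x, '9', rfl, by simp [pvF, hx9], rfl⟩
    · exact ⟨x, '6', rfl, by simp [pvF, hx9], rfl⟩

theorem shapeC (l : List Char) (y : Char) (hy6 : y ≠ '6') (hy9 : y ≠ '9') :
    l.map pvF = ['6', y] ↔ (l = ['6', y] ∨ l = ['9', y]) := by
  rw [mapf_eq]
  constructor
  · rintro ⟨a, b, rfl, ha, hb⟩
    rcases (pvF_eq b y hy9).1 hb with rfl | ⟨h, -⟩
    · rcases (pvF_eq a '6' (by decide)).1 ha with rfl | ⟨-, rfl⟩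
      · exact Or.inl rfl
      · exact Or.inr rfl
    · exact absurd h hy6
  · rintro (rfl | rfl)
    · exact ⟨'6', y, rfl, rfl, by simp [pvF, hy9]⟩
    · exact ⟨'9', y, rfl, rfl, by simp [pvF, hy9]⟩

theorem cls01 (s : String) : s ∈ (["01"] : List String) ↔ pvNorm s = String.ofList ['0', '1'] := by
  rw [← String.toList_inj, pvNorm_toList, String.toList_ofList]
  rw [shapeA s.toList '0' '1' (by decide) (by decide) (by decide) (by decide)]
  simp [← String.toList_inj]

theorem cls04 (s : String) : s ∈ (["04"] : List String) ↔ pvNorm s = String.ofList ['0', '4'] := by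
  rw [← String.toList_inj, pvNorm_toList, String.toList_ofList]
  rw [shapeA s.toList '0' '4' (by decide) (by decide) (by decide) (by decide)]
  simp [← String.toList_inj]

theorem cls25 (s : String) : s ∈ (["25"] : List String) ↔ pvNorm s = String.ofList ['2', '5'] := by
  rw [← String.toList_inj, pvNorm_toList, String.toList_ofList]
  rw [shapeA s.toList '2' '5' (by decide) (by decide) (by decide) (by decide)]
  simp [← String.toList_inj]

theorem cls81 (s : String) : s ∈ (["81"] : List String) ↔ pvNorm s = String.ofList ['8', '1'] := by
  rw [← String.toList_inj, pvNorm_toList, String.toList_ofList]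
  rw [shapeA s.toList '8' '1' (by decide) (by decide) (by decide) (by decide)]
  simp [← String.toList_inj]

theorem cls06 (s : String) : s ∈ (["09", "06"] : List String) ↔ pvNorm s = String.ofList ['0', '6'] := by
  rw [← String.toList_inj, pvNorm_toList, String.toList_ofList]
  rw [shapeB s.toList '0' (by decide) (by decide)]
  simp [← String.toList_inj]

theorem cls16 (s : String) : s ∈ (["16", "19"] : List String) ↔ pvNorm s = String.ofList ['1', '6'] := by
  rw [← String.toList_inj, pvNorm_toList, String.toList_ofList]
  rw [shapeB s.toList '1' (by decide) (by decide)]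
  simp [← String.toList_inj]
  tauto

theorem cls36 (s : String) : s ∈ (["36", "39"] : List String) ↔ pvNorm s = String.ofList ['3', '6'] := by
  rw [← String.toList_inj, pvNorm_toList, String.toList_ofList]
  rw [shapeB s.toList '3' (by decide) (by decide)]
  simp [← String.toList_inj]
  tauto

theorem cls46 (s : String) : s ∈ (["49", "46"] : List String) ↔ pvNorm s = String.ofList ['4', '6'] := by
  rw [← String.toList_inj, pvNorm_toList, String.toList_ofList]
  rw [shapeB s.toList '4' (by decide) (by decide)]
  simp [← String.toList_inj]

theorem cls64 (s : String) : s ∈ (["64", "94"] : List String) ↔ pvNorm s = String.ofList ['6', '4'] := by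
  rw [← String.toList_inj, pvNorm_toList, String.toList_ofList]
  rw [shapeC s.toList '4' (by decide) (by decide)]
  simp [← String.toList_inj]

theorem pySetD_idem (p : List Int) (i v : Int) :
    PySem.List.pySetD (PySem.List.pySetD p i v) i v = PySem.List.pySetD p i v := by
  simp only [PySem.List.pySetD, PySem.List.pySet?]
  cases h : PySem.List.pyIdx? p.length i with
  | none => simp [h]
  | some k => simp [h, List.length_set, List.set_set]

theorem inner_fold (c : String → Bool) (sq : List String) (p : List Int) (i : Int) :
    sq.foldl (fun p pos => if c pos then PySem.List.pySetD p i 1 else p) p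
      = if sq.any c then PySem.List.pySetD p i 1 else p := by
  induction sq generalizing p with
  | nil => simp
  | cons a tl ih =>
    by_cases h : c a = true
    · simp [h, ih, pySetD_idem]
    · simp [h, ih]

theorem A_core (c : String → Bool) :
    (!(((PySem.List.enumerate pvValsA).foldl
        (fun pres isq => isq.2.foldl
          (fun p pos => if c pos then PySem.List.pySetD p isq.1 1 else p) pres)
        ([0, 0, 0, 0, 0, 0, 0, 0, 0] : List Int)).any (fun pr => pr == 0)))
      = pvValsA.all (fun sq => sq.any c) := by
  simp only [pvValsA, PySem.List.enumerate_cons, PySem.List.enumerate_nil,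
    List.foldl_cons, List.foldl_nil, inner_fold, List.all_cons, List.all_nil]
  generalize (["01"] : List String).any c = b0
  generalize (["04"] : List String).any c = b1
  generalize (["09", "06"] : List String).any c = b2
  generalize (["16", "19"] : List String).any c = b3
  generalize (["25"] : List String).any c = b4
  generalize (["36", "39"] : List String).any c = b5
  generalize (["49", "46"] : List String).any c = b6
  generalize (["64", "94"] : List String).any c = b7
  generalize (["81"] : List String).any c = b8
  revert b0 b1 b2 b3 b4 b5 b6 b7 b8
  decide

theorem memA (d1 d2 : List (List String)) (x : String) :
    x ∈ two_dices_pairs d1 d2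
      ↔ ((∃ a ∈ d1, ∃ b ∈ d2, PySem.Str.join "" (a ++ b) = x)
          ∨ ∃ a ∈ d1, ∃ b ∈ d2, PySem.Str.join "" (b ++ a) = x) := by
  simp [two_dices_pairs]

theorem flatten_intersperse_nil (ls : List (List Char)) :
    (List.intersperse ([] : List Char) ls).flatten = ls.flatten := by
  induction ls with
  | nil => rfl
  | cons a tl ih =>
    cases tl with
    | nil => rfl
    | cons b tl2 =>
      rw [show List.intersperse ([] : List Char) (a :: b :: tl2)
          = a :: [] :: List.intersperse [] (b :: tl2) from rfl]
      simp at ih ⊢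
      simp [ih]

theorem join_nil_eq_flatten (ls : List (List Char)) : PySem.Chars.join [] ls = ls.flatten := by
  simp [PySem.Chars.join, List.intercalate, flatten_intersperse_nil]

theorem join_nil_append (l1 l2 : List (List Char)) :
    PySem.Chars.join [] (l1 ++ l2) = PySem.Chars.join [] l1 ++ PySem.Chars.join [] l2 := by
  rw [join_nil_eq_flatten, join_nil_eq_flatten, join_nil_eq_flatten, List.flatten_append]

theorem key_append (f1 f2 : List String) :
    pvKey f1 ++ pvKey f2 = pvNorm (PySem.Str.join "" (f1 ++ f2)) := by
  rw [← String.toList_inj, String.toList_append]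
  simp only [pvKey, pvNorm_toList, PySem.Str.toList_join, List.map_append]
  rw [show ("" : String).toList = [] from rfl, join_nil_append, List.map_append]

-- membership in a key set
theorem mem_keys (d : List (List String)) (u : String) :
    PySem.Set.contains (pvKeys d) u = true ↔ ∃ a ∈ d, pvKey a = u := by
  rw [PySem.Set.contains_iff, pvKeys, PySem.Set.mem_ofList, List.mem_map]

-- the only ways two strings concatenate to a 2-character string
theorem append_eq_pair (u v : List Char) (x y : Char) :
    u ++ v = [x, y] ↔ (u = [] ∧ v = [x, y]) ∨ (u = [x] ∧ v = [y]) ∨ (u = [x, y] ∧ v = []) := by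
  cases u with
  | nil => simp
  | cons a tl =>
    cases tl with
    | nil => simp
    | cons b tl2 =>
      simp [List.append_eq_nil_iff]
      tauto

theorem sappend_eq_pair (u v : String) (x y : Char) :
    u ++ v = String.ofList [x, y]
      ↔ (u = String.ofList [] ∧ v = String.ofList [x, y])
        ∨ (u = String.ofList [x] ∧ v = String.ofList [y])
        ∨ (u = String.ofList [x, y] ∧ v = String.ofList []) := by
  simp only [← String.toList_inj, String.toList_append, String.toList_ofList]
  exact append_eq_pair u.toList v.toList x y

-- B's covered on a two-character square, written out
theorem covered_pair (k1 k2 : PySem.Set String) (x y : Char) :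
    pvCovered k1 k2 (String.ofList [x, y])
      = ((PySem.Set.contains k1 (String.ofList []) && PySem.Set.contains k2 (String.ofList [x, y]))
          || (PySem.Set.contains k2 (String.ofList []) && PySem.Set.contains k1 (String.ofList [x, y]))
          || ((PySem.Set.contains k1 (String.ofList [x]) && PySem.Set.contains k2 (String.ofList [y]))
              || (PySem.Set.contains k2 (String.ofList [x]) && PySem.Set.contains k1 (String.ofList [y]))
              || ((PySem.Set.contains k1 (String.ofList [x, y]) && PySem.Set.contains k2 (String.ofList []))
                  || (PySem.Set.contains k2 (String.ofList [x, y]) && PySem.Set.contains k1 (String.ofList []))))) := by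
  have hlen : (PySem.Str.len (String.ofList [x, y]) : Int) + 1 = 3 := by
    simp [PySem.Str.len_eq]
  have hr : PySem.List.pyRange 0 3 1 = [0, 1, 2] := by decide
  have h0t : PySem.Str.slice (String.ofList [x, y]) none (some 0) = String.ofList [] := by
    rw [← String.toList_inj]
    simp [PySem.Str.toList_slice, PySem.List.slice_to]
  have h0f : PySem.Str.slice (String.ofList [x, y]) (some 0) none = String.ofList [x, y] := by
    rw [← String.toList_inj]
    simp [PySem.Str.toList_slice, PySem.List.slice_from]
  have h1t : PySem.Str.slice (String.ofList [x, y]) none (some 1) = String.ofList [x] := by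
    rw [← String.toList_inj]
    simp [PySem.Str.toList_slice, PySem.List.slice_to]
  have h1f : PySem.Str.slice (String.ofList [x, y]) (some 1) none = String.ofList [y] := by
    rw [← String.toList_inj]
    simp [PySem.Str.toList_slice, PySem.List.slice_from]
  have h2t : PySem.Str.slice (String.ofList [x, y]) none (some 2) = String.ofList [x, y] := by
    rw [← String.toList_inj]
    simp [PySem.Str.toList_slice, PySem.List.slice_to]
  have h2f : PySem.Str.slice (String.ofList [x, y]) (some 2) none = String.ofList [] := by
    rw [← String.toList_inj]
    simp [PySem.Str.toList_slice, PySem.List.slice_from]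
  rw [pvCovered, hlen, hr]
  simp only [List.any_cons, List.any_nil, h0t, h0f, h1t, h1f, h2t, h2f, Bool.or_false]

-- the bridge: A's scan of the pairs list for the alternatives of one square equals B's split test
theorem comp_eq (dice1 dice2 : List (List String)) (alts : List String) (x y : Char)
    (h : ∀ s : String, s ∈ alts ↔ pvNorm s = String.ofList [x, y]) :
    alts.any (fun pos => (two_dices_pairs dice1 dice2).contains pos)
      = pvCovered (pvKeys dice1) (pvKeys dice2) (String.ofList [x, y]) := by
  rw [covered_pair]
  apply Bool.coe_iff_coe.mp
  rw [List.any_eq_true]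
  simp only [Bool.or_eq_true, Bool.and_eq_true, mem_keys]
  constructor
  · rintro ⟨pos, hpos, hc⟩
    have hr := (h pos).1 hpos
    have : (∃ a ∈ dice1, ∃ b ∈ dice2, pvKey a ++ pvKey b = String.ofList [x, y])
        ∨ ∃ a ∈ dice1, ∃ b ∈ dice2, pvKey b ++ pvKey a = String.ofList [x, y] := by
      rcases (memA dice1 dice2 pos).1 (List.contains_iff_mem.mp hc) with ⟨a, ha, b, hb, hx⟩ | ⟨a, ha, b, hb, hx⟩
      · exact Or.inl ⟨a, ha, b, hb, by rw [key_append, hx, hr]⟩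
      · exact Or.inr ⟨a, ha, b, hb, by rw [key_append, hx, hr]⟩
    rcases this with ⟨a, ha, b, hb, hab⟩ | ⟨a, ha, b, hb, hab⟩
    · rcases (sappend_eq_pair _ _ x y).1 hab with ⟨h1, h2⟩ | ⟨h1, h2⟩ | ⟨h1, h2⟩
      · exact Or.inl (Or.inl ⟨⟨a, ha, h1⟩, ⟨b, hb, h2⟩⟩)
      · exact Or.inr (Or.inl (Or.inl ⟨⟨a, ha, h1⟩, ⟨b, hb, h2⟩⟩))
      · exact Or.inr (Or.inr (Or.inl ⟨⟨a, ha, h1⟩, ⟨b, hb, h2⟩⟩))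
    · rcases (sappend_eq_pair _ _ x y).1 hab with ⟨h1, h2⟩ | ⟨h1, h2⟩ | ⟨h1, h2⟩
      · exact Or.inl (Or.inr ⟨⟨b, hb, h1⟩, ⟨a, ha, h2⟩⟩)
      · exact Or.inr (Or.inl (Or.inr ⟨⟨b, hb, h1⟩, ⟨a, ha, h2⟩⟩))
      · exact Or.inr (Or.inr (Or.inr ⟨⟨b, hb, h1⟩, ⟨a, ha, h2⟩⟩))
  · intro hcov
    have : (∃ a ∈ dice1, ∃ b ∈ dice2, pvKey a ++ pvKey b = String.ofList [x, y])
        ∨ ∃ a ∈ dice1, ∃ b ∈ dice2, pvKey b ++ pvKey a = String.ofList [x, y] := by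
      rcases hcov with (⟨⟨a, ha, h1⟩, ⟨b, hb, h2⟩⟩ | ⟨⟨b, hb, h1⟩, ⟨a, ha, h2⟩⟩)
          | ((⟨⟨a, ha, h1⟩, ⟨b, hb, h2⟩⟩ | ⟨⟨b, hb, h1⟩, ⟨a, ha, h2⟩⟩)
          | (⟨⟨a, ha, h1⟩, ⟨b, hb, h2⟩⟩ | ⟨⟨b, hb, h1⟩, ⟨a, ha, h2⟩⟩))
      · exact Or.inl ⟨a, ha, b, hb, (sappend_eq_pair _ _ x y).2 (Or.inl ⟨h1, h2⟩)⟩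
      · exact Or.inr ⟨a, ha, b, hb, (sappend_eq_pair _ _ x y).2 (Or.inl ⟨h1, h2⟩)⟩
      · exact Or.inl ⟨a, ha, b, hb, (sappend_eq_pair _ _ x y).2 (Or.inr (Or.inl ⟨h1, h2⟩))⟩
      · exact Or.inr ⟨a, ha, b, hb, (sappend_eq_pair _ _ x y).2 (Or.inr (Or.inl ⟨h1, h2⟩))⟩
      · exact Or.inl ⟨a, ha, b, hb, (sappend_eq_pair _ _ x y).2 (Or.inr (Or.inr ⟨h1, h2⟩))⟩
      · exact Or.inr ⟨a, ha, b, hb, (sappend_eq_pair _ _ x y).2 (Or.inr (Or.inr ⟨h1, h2⟩))⟩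
    rcases this with ⟨a, ha, b, hb, hab⟩ | ⟨a, ha, b, hb, hab⟩
    · exact ⟨PySem.Str.join "" (a ++ b), (h _).2 (by rw [← key_append, hab]),
        List.contains_iff_mem.mpr ((memA _ _ _).2 (Or.inl ⟨a, ha, b, hb, rfl⟩))⟩
    · exact ⟨PySem.Str.join "" (b ++ a), (h _).2 (by rw [← key_append, hab]),
        List.contains_iff_mem.mpr ((memA _ _ _).2 (Or.inr ⟨a, ha, b, hb, rfl⟩))⟩

-- ===== VERDICT (by name: the statement is the Claim_ definition above) =====
theorem squares_validation_spec : Claim_equal_squares_validation := by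
  intro dice1 dice2 _
  unfold Spec_squares_validation squares_validation squares_validation_alt
  rw [A_core (fun pos => (two_dices_pairs dice1 dice2).contains pos)]
  simp only [pvValsA, List.all_cons, List.all_nil]
  rw [comp_eq dice1 dice2 _ '0' '1' cls01, comp_eq dice1 dice2 _ '0' '4' cls04,
    comp_eq dice1 dice2 _ '0' '6' cls06, comp_eq dice1 dice2 _ '1' '6' cls16,
    comp_eq dice1 dice2 _ '2' '5' cls25, comp_eq dice1 dice2 _ '3' '6' cls36,
    comp_eq dice1 dice2 _ '4' '6' cls46, comp_eq dice1 dice2 _ '6' '4' cls64,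
    comp_eq dice1 dice2 _ '8' '1' cls81]
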